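-- pv_equiv track=rewrite | github.com/oFtangcY/2024fall-cs101.Assignment-P | daily_problem/Kousuke_sAssignment.py | matchsum
-- ===== SOURCE A (Python) =====
-- def matchsum(a, n):
--     q = set()
--     q.add(0)
--     suma = 0
--     cnt = 0
--
--     for i in range(n):
--         suma += a[i]
--         if suma in q:
--             q.clear()
--             cnt += 1
--         q.add(suma)
--
--     return cnt
-- ===== SOURCE B (Python) =====
-- def matchsum(a, n):
--     # Pass 1: build the list of prefix sums p[0..n].
--     p = [0]
--     for i in range(n):
--         p.append(p[-1] + a[i])
--     # Pass 2: DP scan over prefix sums: best[s] = best count at a position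
--     # with prefix sum s; a repeat of s closes one more zero-sum block.
--     best = {}
--     dp = 0
--     for s in p:
--         if s in best:
--             dp = max(dp, best[s] + 1)
--         best[s] = dp
--     return dp
-- ===== Notes on version B (the rewrite author's own statement) =====
-- stated objective: alternative
-- what changed: Replaces the one-pass greedy seen-set with clear() by two staged passes: first materialise the prefix-sum list, then a dynamic-programming scan over it with a dict of best counts per prefix sum and no state reset.
import Mathlib
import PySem

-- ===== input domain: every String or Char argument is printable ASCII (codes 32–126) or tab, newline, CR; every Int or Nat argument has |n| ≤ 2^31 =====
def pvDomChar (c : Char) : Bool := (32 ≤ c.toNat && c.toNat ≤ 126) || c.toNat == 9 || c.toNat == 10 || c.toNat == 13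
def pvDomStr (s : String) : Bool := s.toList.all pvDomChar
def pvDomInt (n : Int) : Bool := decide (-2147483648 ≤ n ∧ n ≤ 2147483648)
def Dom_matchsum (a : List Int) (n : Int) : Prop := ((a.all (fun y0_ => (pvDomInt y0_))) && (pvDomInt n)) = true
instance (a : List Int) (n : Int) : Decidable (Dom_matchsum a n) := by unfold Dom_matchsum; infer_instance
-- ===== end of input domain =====

-- B replaces A's one-pass greedy clear-the-seen-set loop by two staged passes: build the
-- prefix-sum list, then a DP dict scan over it (objective: alternative; same cost).


-- ===== PORT A =====
-- one loop iteration of A: suma += a[i]; if suma in q: q.clear(); cnt += 1; q.add(suma)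
def matchsumStepA (a : List Int) (st : PySem.Set Int × Int × Int) (i : Int) :
    PySem.Set Int × Int × Int :=
  let suma := st.2.1 + PySem.List.pyGetD a i 0
  if PySem.Set.contains st.1 suma then
    (PySem.Set.add PySem.Set.empty suma, suma, st.2.2 + 1)
  else
    (PySem.Set.add st.1 suma, suma, st.2.2)

def matchsum (a : List Int) (n : Int) : Int :=
  ((PySem.List.pyRange 0 n 1).foldl (matchsumStepA a)
      (PySem.Set.add PySem.Set.empty 0, 0, 0)).2.2

-- ===== PORT B =====
-- pass 1 of B: p = [0]; for i in range(n): p.append(p[-1] + a[i])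
def matchsumPrefix (a : List Int) (n : Int) : List Int :=
  (PySem.List.pyRange 0 n 1).foldl
    (fun p i => p ++ [PySem.List.pyGetD p (-1) 0 + PySem.List.pyGetD a i 0]) [0]

-- pass 2 of B: for s in p: if s in best: dp = max(dp, best[s]+1); best[s] = dp
def matchsumScan : List Int → PySem.Dict Int Int → Int → Int
  | [], _, dp => dp
  | s :: rest, best, dp =>
      let d := match best.get? s with
        | some v => max dp (v + 1)
        | none => dp
      matchsumScan rest (best.insert s d) d

def matchsum_alt (a : List Int) (n : Int) : Int :=
  matchsumScan (matchsumPrefix a n) PySem.Dict.empty 0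

-- ===== PRECONDITION & SPEC =====
-- Both programs index a[i] for every i in range(n): IndexError (excluded) exactly when n > len(a).
def Pre_matchsum (a : List Int) (n : Int) : Prop := n ≤ (a.length : Int)
instance (a : List Int) (n : Int) : Decidable (Pre_matchsum a n) := by
  unfold Pre_matchsum; infer_instance

def pvWitness_matchsum : List Int × Int := ([1, -1, 2, -2, 3], 5)

def Spec_matchsum (a : List Int) (n : Int) (out : Int) : Prop := out = matchsum_alt a n
instance (a : List Int) (n : Int) (out : Int) : Decidable (Spec_matchsum a n out) := by
  unfold Spec_matchsum; infer_instance

-- ===== CLAIM (what is proved, stated in full; the proofs are below) =====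
def Claim_equal_matchsum : Prop := ∀ (a : List Int) (n : Int), Dom_matchsum a n → Pre_matchsum a n → Spec_matchsum a n (matchsum a n)

-- ===== LEMMAS AND PROOFS =====

-- The running sums produced when A's loop walks the index list l starting from sum `suma`.
def runSums (a : List Int) (l : List Int) (suma : Int) : List Int :=
  match l with
  | [] => []
  | i :: rest =>
      let s := suma + PySem.List.pyGetD a i 0
      s :: runSums a rest s

-- Pass 1 of B computes exactly p ++ runSums: the append step reads p[-1], the last running sum.
theorem matchsumPrefix_foldl (a : List Int) (l : List Int) :
    ∀ (p : List Int) (suma : Int), PySem.List.pyGetD p (-1) 0 = suma → p ≠ [] →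
      l.foldl (fun p i => p ++ [PySem.List.pyGetD p (-1) 0 + PySem.List.pyGetD a i 0]) p
        = p ++ runSums a l suma := by
  induction l with
  | nil => intro p suma _ _; simp [runSums]
  | cons i rest ih =>
    intro p suma hlast hne
    simp only [List.foldl_cons, runSums, hlast]
    rw [ih (p ++ [suma + PySem.List.pyGetD a i 0]) (suma + PySem.List.pyGetD a i 0)
        (PySem.List.pyGetD_neg_one_append_singleton p _ 0) (by simp)]
    simp

-- Coupling invariant between A's state (q, suma, cnt) and B's scan state (best, dp):
-- cnt = dp, q holds exactly the prefix sums whose dict value is the current cnt,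
-- and every dict value is at most cnt.
def matchsumRel (q : PySem.Set Int) (cnt : Int) (best : PySem.Dict Int Int) (dp : Int) : Prop :=
  cnt = dp ∧
  (∀ x : Int, x ∈ q ↔ best.get? x = some cnt) ∧
  (∀ x v, best.get? x = some v → v ≤ cnt)

-- A's fold over an index list and B's scan over the corresponding running sums agree.
theorem matchsumRel_foldl (a : List Int) (l : List Int) :
    ∀ (q : PySem.Set Int) (suma cnt : Int) (best : PySem.Dict Int Int) (dp : Int),
      matchsumRel q cnt best dp →
      (l.foldl (matchsumStepA a) (q, suma, cnt)).2.2
        = matchsumScan (runSums a l suma) best dp := by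
  induction l with
  | nil => intro q suma cnt best dp h; simpa [runSums, matchsumScan] using h.1
  | cons i rest ih =>
    intro q suma cnt best dp h
    obtain ⟨hc, hmem, hle⟩ := h
    subst hc
    simp only [List.foldl_cons, runSums, matchsumScan, matchsumStepA]
    set t := suma + PySem.List.pyGetD a i 0 with ht
    by_cases hq : t ∈ q
    · have hg : best.get? t = some cnt := (hmem t).mp hq
      rw [if_pos ((PySem.Set.contains_iff _ _).mpr hq)]
      have hdp : (match best.get? t with
          | some v => max cnt (v + 1)
          | none => cnt) = cnt + 1 := by
        rw [hg]; show max cnt (cnt + 1) = cnt + 1; omega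
      simp only [hdp]
      refine ih _ _ _ _ _ ⟨rfl, ?_, ?_⟩
      · intro x
        rw [PySem.Dict.get?_insert]
        by_cases hx : x = t
        · subst hx; simp [PySem.Set.empty]
        · simp only [if_neg hx]
          constructor
          · intro hx'
            have h2 := (PySem.Set.mem_add (s := PySem.Set.empty) (x := t) (y := x)).mp hx'
            simp [PySem.Set.empty] at h2
            exact absurd h2 hx
          · intro hx'
            have := hle x _ hx'
            omega
      · intro x v hv
        rw [PySem.Dict.get?_insert] at hv
        by_cases hx : x = t
        · subst hx; rw [if_pos rfl] at hv; injection hv with h; exact le_of_eq h.symm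
        · rw [if_neg hx] at hv
          have := hle x v hv; omega
    · have hg : ∀ v, best.get? t = some v → v < cnt := by
        intro v hv
        have hvle := hle t v hv
        have h1 : ¬ (best.get? t = some cnt) := fun h' => hq ((hmem t).mpr h')
        have : v ≠ cnt := fun h' => h1 (h' ▸ hv)
        omega
      rw [if_neg (by simp [hq])]
      have hdp : (match best.get? t with
          | some v => max cnt (v + 1)
          | none => cnt) = cnt := by
        cases hgt : best.get? t with
        | none => rfl
        | some v => have := hg v hgt; simp; omega
      simp only [hdp]
      refine ih _ _ _ _ _ ⟨rfl, ?_, ?_⟩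
      · intro x
        rw [PySem.Dict.get?_insert, PySem.Set.mem_add]
        by_cases hx : x = t
        · simp [hx]
        · simp only [hx, or_false]
          exact hmem x
      · intro x v hv
        rw [PySem.Dict.get?_insert] at hv
        by_cases hx : x = t
        · simp [hx] at hv; omega
        · rw [if_neg hx] at hv
          exact hle x v hv

-- ===== VERDICT (by name: the statement is the Claim_ definition above) =====
theorem matchsum_spec : Claim_equal_matchsum := by
  intro a n _ _
  unfold Spec_matchsum matchsum matchsum_alt matchsumPrefix
  rw [matchsumPrefix_foldl a _ [0] 0 (by simp [PySem.List.pyGetD, PySem.List.pyGet?, PySem.List.pyIdx?]) (by simp)]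
  show _ = matchsumScan (0 :: runSums a (PySem.List.pyRange 0 n 1) 0) PySem.Dict.empty 0
  rw [matchsumScan]
  have h0 : (PySem.Dict.empty : PySem.Dict Int Int).get? 0 = none := PySem.Dict.get?_empty 0
  simp only [h0]
  refine matchsumRel_foldl a _ _ _ _ _ _ ⟨rfl, ?_, ?_⟩
  · intro x
    rw [PySem.Dict.get?_insert]
    by_cases hx : x = 0 <;> simp [hx, PySem.Set.empty, PySem.Set.add, PySem.Dict.get?_empty]
  · intro x v hv
    rw [PySem.Dict.get?_insert] at hv
    by_cases hx : x = 0
    · simp [hx] at hv; show v ≤ 0; omega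
    · rw [if_neg hx, PySem.Dict.get?_empty] at hv; exact absurd hv (by simp)
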